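-- pv_equiv track=rewrite | github.com/GuilhermeGomesDosSantos/Livro_Entendendo_Algoritmos | Capitulo 1 - Pesquisa Binária/Exercicios/ex_01.py | encontrar_menor_indice_faltante
-- ===== SOURCE A (Python) =====
-- def encontrar_menor_indice_faltante(lista):
--     valor_menor = 0
--     valor_maior = len(lista) - 1
--
--     while valor_menor <= valor_maior:
--         meio = (valor_menor + valor_maior) // 2
--         valor = lista[meio]
--
--         if lista[meio] == meio:
--             valor_menor = meio + 1
--
--         else:
--             valor_maior = meio - 1
--
--     return valor_menor
-- ===== SOURCE B (Python) =====
-- def encontrar_menor_indice_faltante(lista):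
--     def busca(lo, hi):
--         if lo > hi:
--             return lo
--         mid = lo + (hi - lo) // 2
--         if lista[mid] != mid:
--             return busca(lo, mid - 1)
--         return busca(mid + 1, hi)
--     return busca(0, len(lista) - 1)
-- ===== Notes on version B (the rewrite author's own statement) =====
-- stated objective: alternative
-- what changed: The iterative while-loop binary search with mutable lo/hi is re-expressed as a recursive divide-and-conquer helper busca(lo,hi) with the inverted branch test and the overflow-safe midpoint lo + (hi-lo)//2; it follows the identical search path, so the boundary index returned is the same.
import Mathlib
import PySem

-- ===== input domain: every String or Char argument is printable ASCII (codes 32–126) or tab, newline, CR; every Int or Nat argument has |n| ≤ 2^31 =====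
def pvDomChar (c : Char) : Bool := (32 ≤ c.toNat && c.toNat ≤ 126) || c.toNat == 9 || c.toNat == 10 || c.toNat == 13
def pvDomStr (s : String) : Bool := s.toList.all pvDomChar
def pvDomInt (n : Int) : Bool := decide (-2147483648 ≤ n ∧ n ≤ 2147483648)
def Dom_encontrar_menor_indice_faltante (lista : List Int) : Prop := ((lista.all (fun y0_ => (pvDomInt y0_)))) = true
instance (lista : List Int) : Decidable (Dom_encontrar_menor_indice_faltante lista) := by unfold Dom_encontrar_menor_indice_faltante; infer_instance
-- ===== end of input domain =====

-- B rewrites A's iterative binary search as a recursive divide-and-conquer helper with the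
-- inverted branch test and midpoint lo + (hi-lo)//2 (alternative decomposition, same cost).


-- ===== PORT A =====
-- A's while loop over the mutable pair (valor_menor, valor_maior); the index meio is always
-- in range when the loop body runs, so pyGetD's default is never consulted.
def pvLoopA (lista : List Int) (lo hi : Int) : Int :=
  if _h : lo ≤ hi then
    let meio := PySem.Int.floordiv (lo + hi) 2
    if PySem.List.pyGetD lista meio 0 = meio then
      pvLoopA lista (meio + 1) hi
    else
      pvLoopA lista lo (meio - 1)
  else lo
termination_by (hi + 1 - lo).toNat
decreasing_by
  · have := PySem.Int.floordiv_two_mid_bounds _h; omega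
  · have := PySem.Int.floordiv_two_mid_bounds _h; omega

def encontrar_menor_indice_faltante (lista : List Int) : Int :=
  pvLoopA lista 0 ((lista.length : Int) - 1)

-- ===== PORT B =====
-- B's recursive helper busca(lo, hi); again the index mid is always in range at the lookup.
def pvBuscaB (lista : List Int) (lo hi : Int) : Int :=
  if _h : lo > hi then lo
  else
    let mid := lo + PySem.Int.floordiv (hi - lo) 2
    if PySem.List.pyGetD lista mid 0 ≠ mid then
      pvBuscaB lista lo (mid - 1)
    else
      pvBuscaB lista (mid + 1) hi
termination_by (hi + 1 - lo).toNat
decreasing_by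
  · have := PySem.Int.floordiv_two_mid_bounds (show (0:Int) ≤ hi - lo by omega)
    rw [zero_add] at this; omega
  · have := PySem.Int.floordiv_two_mid_bounds (show (0:Int) ≤ hi - lo by omega)
    rw [zero_add] at this; omega

def encontrar_menor_indice_faltante_alt (lista : List Int) : Int :=
  pvBuscaB lista 0 ((lista.length : Int) - 1)

-- ===== PRECONDITION & SPEC =====
def Spec_encontrar_menor_indice_faltante (lista : List Int) (out : Int) : Prop := out = encontrar_menor_indice_faltante_alt lista
instance (lista : List Int) (out : Int) : Decidable (Spec_encontrar_menor_indice_faltante lista out) := by unfold Spec_encontrar_menor_indice_faltante; infer_instance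

-- ===== CLAIM (what is proved, stated in full; the proofs are below) =====
def Claim_equal_encontrar_menor_indice_faltante : Prop := ∀ (lista : List Int), Dom_encontrar_menor_indice_faltante lista → Spec_encontrar_menor_indice_faltante lista (encontrar_menor_indice_faltante lista)

-- ===== LEMMAS AND PROOFS =====

-- B's midpoint lo + (hi-lo)//2 equals A's midpoint (lo+hi)//2.
theorem pvMid_eq (lo hi : Int) : lo + PySem.Int.floordiv (hi - lo) 2 = PySem.Int.floordiv (lo + hi) 2 := by
  have h1 := (PySem.Int.floordiv_eq_iff_of_pos (a := lo + hi) (b := 2)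
      (q := PySem.Int.floordiv (lo + hi) 2) (by omega)).mp rfl
  have h2 : PySem.Int.floordiv (hi - lo) 2 = PySem.Int.floordiv (lo + hi) 2 - lo := by
    rw [PySem.Int.floordiv_eq_iff_of_pos (by omega)]
    omega
  omega

theorem pvLoop_eq_busca (lista : List Int) : ∀ (n : Nat) (lo hi : Int),
    (hi + 1 - lo).toNat = n → pvLoopA lista lo hi = pvBuscaB lista lo hi := by
  intro n
  induction n using Nat.strong_induction_on with
  | _ n ih =>
    intro lo hi hn
    rw [pvLoopA, pvBuscaB]
    by_cases h : lo ≤ hi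
    · simp only [h, dif_pos, show ¬ lo > hi by omega, dif_neg, not_false_iff]
      rw [pvMid_eq lo hi]
      have hb := PySem.Int.floordiv_two_mid_bounds h
      by_cases he : PySem.List.pyGetD lista (PySem.Int.floordiv (lo + hi) 2) 0
          = PySem.Int.floordiv (lo + hi) 2
      · simp only [he, if_pos, ne_eq, not_true_eq_false, if_false]
        exact ih _ (by omega) _ _ rfl
      · simp only [he, if_neg, not_false_iff, ne_eq, if_true]
        exact ih _ (by omega) _ _ rfl
    · simp only [h, dif_neg, not_false_iff, show lo > hi by omega, dif_pos]

-- ===== VERDICT (by name: the statement is the Claim_ definition above) =====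
theorem encontrar_menor_indice_faltante_spec : Claim_equal_encontrar_menor_indice_faltante := by
  intro lista _
  unfold Spec_encontrar_menor_indice_faltante encontrar_menor_indice_faltante encontrar_menor_indice_faltante_alt
  exact pvLoop_eq_busca lista _ 0 _ rfl
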